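-- pv_equiv track=rewrite | github.com/5ucur/keysmash | keysmash.py | decode_multiple
-- ===== SOURCE A (Python) =====
-- abcd = "abcdefghijklmnopqrstuvwxyz"
--
-- def decode_multiple(encoded, code, in_lists=False):
--     '''Decodes encoded using code. Enable in_lists if working on a nested list
-- instead of continuous text.'''
--     if len(encoded) == 1:
--         return decode(encoded, code)
--     if in_lists:
--         full = []
--         word = []
--         code_part = []
--         symb = []
--         for character, decoder in zip(encoded, code):
--             if character not in abcd:
--                 if word:
--                     full.append(decode(''.join(word), ''.join(code_part)))
--                     word = []
--                     code_part = []
--                 symb.append(character)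
--             else:
--                 if symb:
--                     full.append(''.join(symb))
--                     symb = []
--                 word.append(character)
--                 code_part.append(decoder)
--         if word:
--             full.append(decode(''.join(word), ''.join(code_part)))
--         if symb:
--             full.append(''.join(symb))
--         return ''.join(full)
--     else:
--         full = []
--         word = []
--         symb = []
--         for string, decoder in zip(encoded, code):
--             if string[0] not in abcd:
--                 full.append(string)
--             else:
--                 full.append(decode(''.join(string), decoder))
--         return ''.join(full)
--
-- def decode(string, code):
--     '''Decodes string using code. Strictly works only on strings containing only
-- the letters a-z.'''
--     string = string.casefold()
--     if len(string) == 1: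
--         if (code := abcd.index(code)) < 25 - abcd.index(string):
--             return chr(ord(string) + code)
--         else:
--             return chr(ord(string) + (code - 26))
--     else:
--         decode = []
--         text = []
--         for a,b in zip(string, code):
--             if (element := abcd.index(b)) < 25 - abcd.index(a):
--                 decode.append(element)
--             else:
--                 decode.append(element - 26)
--         for a,b in zip(string, decode):
--             text.append(chr(ord(a) + b))
--         return ''.join(text)
-- ===== SOURCE B (Python) =====
-- # Alternative decomposition: instead of interleaved word/code_part/symb accumulators,
-- # split the zipped (char, code) pairs into maximal runs keyed on membership in abcd
-- # and render each run independently. Helper `decode` is the module helper A also uses,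
-- # kept unchanged.
--
-- abcd = "abcdefghijklmnopqrstuvwxyz"
--
--
-- def decode_multiple(encoded, code, in_lists=False):
--     '''Decodes encoded using code. Enable in_lists if working on a nested list
-- instead of continuous text.'''
--     if len(encoded) == 1:
--         return decode(encoded, code)
--     pairs = list(zip(encoded, code))
--     if not in_lists:
--         return ''.join(s if s[0] not in abcd else decode(s, d) for s, d in pairs)
--     parts = []
--     i, n = 0, len(pairs)
--     while i < n:
--         is_word = pairs[i][0] in abcd
--         j = i
--         while j < n and (pairs[j][0] in abcd) == is_word:
--             j += 1
--         chunk = pairs[i:j]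
--         if is_word:
--             parts.append(decode(''.join(c for c, _ in chunk),
--                                 ''.join(d for _, d in chunk)))
--         else:
--             parts.append(''.join(c for c, _ in chunk))
--         i = j
--     return ''.join(parts)
--
--
-- def decode(string, code):
--     '''Decodes string using code. Strictly works only on strings containing only
-- the letters a-z.'''
--     string = string.casefold()
--     if len(string) == 1:
--         if (code := abcd.index(code)) < 25 - abcd.index(string):
--             return chr(ord(string) + code)
--         else:
--             return chr(ord(string) + (code - 26))
--     else:
--         decode_ = []
--         text = []
--         for a, b in zip(string, code):
--             if (element := abcd.index(b)) < 25 - abcd.index(a):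
--                 decode_.append(element)
--             else:
--                 decode_.append(element - 26)
--         for a, b in zip(string, decode_):
--             text.append(chr(ord(a) + b))
--         return ''.join(text)
-- ===== Notes on version B (the rewrite author's own statement) =====
-- stated objective: alternative
-- what changed: The in_lists branch's interleaved word/code_part/symb accumulators are replaced by splitting the zipped (character, code) pairs into maximal runs keyed on membership in abcd and rendering each run independently (decode for letter runs, plain join otherwise); the single-element early path and the non-list map are kept.
import Mathlib
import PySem

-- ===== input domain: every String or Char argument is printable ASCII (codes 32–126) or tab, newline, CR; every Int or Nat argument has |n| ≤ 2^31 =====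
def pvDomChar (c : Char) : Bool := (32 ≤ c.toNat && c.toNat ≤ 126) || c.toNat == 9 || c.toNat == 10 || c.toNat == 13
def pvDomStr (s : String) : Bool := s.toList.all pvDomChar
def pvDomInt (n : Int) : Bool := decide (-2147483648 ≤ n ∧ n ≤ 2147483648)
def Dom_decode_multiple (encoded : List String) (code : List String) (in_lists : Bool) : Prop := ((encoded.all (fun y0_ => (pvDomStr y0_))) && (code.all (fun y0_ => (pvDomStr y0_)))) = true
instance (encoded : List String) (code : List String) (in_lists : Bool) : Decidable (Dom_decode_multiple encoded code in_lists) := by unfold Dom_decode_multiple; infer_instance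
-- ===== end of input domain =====

-- B restructures the in_lists loop: maximal runs over the zipped pairs instead of
-- interleaved word/code_part/symb accumulators; same return value (objective: alternative).

-- ===== shared helper: the module's `decode`, called by both A and B =====
def abcdStr : String := "abcdefghijklmnopqrstuvwxyz"

-- port of the module helper `decode` (both Pythons contain it verbatim).
-- `casefold` is ported as `lower` (exact on the ASCII domain Dom);
-- `abcd.index(..)` is ported as `PySem.Str.find`/`Chars.find` (equal to index wherever
-- index returns; where index raises ValueError the input is excluded by Pre_).
def pydecode (string code : String) : String :=
  let s := PySem.Str.lower string
  if PySem.Str.len s == 1 then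
    let ci : Int := PySem.Str.find abcdStr code
    let si : Int := PySem.Str.find abcdStr s
    let c : Char := (s.toList.headD ' ')
    if ci < 25 - si then String.ofList [Char.ofNat ((c.toNat : Int) + ci).toNat]
    else String.ofList [Char.ofNat ((c.toNat : Int) + (ci - 26)).toNat]
  else
    let ds : List Int := (s.toList.zip code.toList).map (fun p =>
      let element : Int := PySem.Chars.find abcdStr.toList [p.2]
      if element < 25 - PySem.Chars.find abcdStr.toList [p.1] then element else element - 26)
    String.ofList ((s.toList.zip ds).map (fun p => Char.ofNat ((p.1.toNat : Int) + p.2).toNat))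

-- s[0] for the `string[0] not in abcd` test (Python raises IndexError on "",
-- excluded by Pre_; the default is never reached inside Pre_)
def headStr (s : String) : String := String.ofList [s.toList.headD ' ']

-- ===== PORT A =====
-- A's in_lists loop, state (full, word, code_part, symb) exactly as in the Python
def aloopA : List (String × String) → List String → List String → List String → List String → String
  | [], full, word, cp, symb =>
      let full1 := if word.isEmpty then full else full ++ [pydecode (PySem.Str.join "" word) (PySem.Str.join "" cp)]
      let full2 := if symb.isEmpty then full1 else full1 ++ [PySem.Str.join "" symb]
      PySem.Str.join "" full2
  | (c, d) :: rest, full, word, cp, symb =>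
      if !(PySem.Str.isIn c abcdStr) then
        if word.isEmpty then aloopA rest full word cp (symb ++ [c])
        else aloopA rest (full ++ [pydecode (PySem.Str.join "" word) (PySem.Str.join "" cp)]) [] [] (symb ++ [c])
      else
        if symb.isEmpty then aloopA rest full (word ++ [c]) (cp ++ [d]) symb
        else aloopA rest (full ++ [PySem.Str.join "" symb]) (word ++ [c]) (cp ++ [d]) []

-- len(encoded) == 1: Python's decode(list, code) raises AttributeError (list has no
-- casefold); excluded by Pre_, the port returns "" there.
def decode_multiple (encoded : List String) (code : List String) (in_lists : Bool) : String :=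
  if encoded.length == 1 then ""
  else if in_lists then
    aloopA (encoded.zip code) [] [] [] []
  else
    PySem.Str.join "" ((encoded.zip code).map (fun p =>
      if !(PySem.Str.isIn (headStr p.1) abcdStr) then p.1 else pydecode p.1 p.2))

-- ===== PORT B =====
def bkey (p : String × String) : Bool := PySem.Str.isIn p.1 abcdStr

-- port of B's run-splitting while-loop (maximal runs of equal key)
def bruns : List (String × String) → List (Bool × List (String × String))
  | [] => []
  | p :: rest =>
      (bkey p, p :: rest.takeWhile (fun q => bkey q == bkey p)) ::
        bruns (rest.dropWhile (fun q => bkey q == bkey p))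
termination_by l => l.length
decreasing_by
  simpa using Nat.lt_succ_of_le (List.length_dropWhile_le _ _)

def decode_multiple_alt (encoded : List String) (code : List String) (in_lists : Bool) : String :=
  if encoded.length == 1 then ""
  else
    let pairs := encoded.zip code
    if !in_lists then
      PySem.Str.join "" (pairs.map (fun p =>
        if !(PySem.Str.isIn (headStr p.1) abcdStr) then p.1 else pydecode p.1 p.2))
    else
      PySem.Str.join "" ((bruns pairs).map (fun g =>
        if g.1 then
          pydecode (PySem.Str.join "" (g.2.map Prod.fst)) (PySem.Str.join "" (g.2.map Prod.snd))
        else PySem.Str.join "" (g.2.map Prod.fst)))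

-- ===== PRECONDITION & SPEC =====
-- decodeOkB w k: the module helper decode(w, k) returns (instead of raising ValueError)
def lowAZ (c : Char) : Bool := 'a' ≤ c && c ≤ 'z'

def decodeOkB (w k : String) : Bool :=
  let t := (PySem.Str.lower w).toList
  if t.length == 1 then PySem.Str.isIn k abcdStr
  else (t.zip k.toList).all (fun p => lowAZ p.1 && lowAZ p.2)

-- Pre_ holds exactly where the Python A returns normally: it excludes a length-1 encoded
-- list (decode receives the list itself: AttributeError), an empty string among the
-- zipped pairs when in_lists is false (IndexError on string[0]), and pairs/segments on
-- which the helper decode would raise ValueError from abcd.index. For in_lists, the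
-- decoded units are the maximal contiguous segments [i, j) of the zipped pairs whose
-- characters all lie in abcd — stated directly over index ranges.
-- [i, j) is a maximal contiguous segment of pairs whose characters are all in abcd
def maximalRun (pairs : List (String × String)) (i j : Nat) : Bool :=
  decide (i < j) && decide (j ≤ pairs.length) && (((pairs.drop i).take (j - i)).all bkey)
    && (i == 0 || !(bkey (pairs.getD (i - 1) ("", ""))))
    && (j == pairs.length || !(bkey (pairs.getD j ("", ""))))

def Pre_decode_multiple (encoded : List String) (code : List String) (in_lists : Bool) : Prop :=
  encoded.length ≠ 1 ∧
  (if in_lists then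
     ∀ i < (encoded.zip code).length + 1, ∀ j < (encoded.zip code).length + 1,
       maximalRun (encoded.zip code) i j = true →
       decodeOkB (PySem.Str.join "" ((((encoded.zip code).drop i).take (j - i)).map Prod.fst))
                 (PySem.Str.join "" ((((encoded.zip code).drop i).take (j - i)).map Prod.snd)) = true
   else
     ∀ p ∈ encoded.zip code, p.1 ≠ "" ∧
       (PySem.Str.isIn (headStr p.1) abcdStr = true → decodeOkB p.1 p.2 = true))

instance (encoded : List String) (code : List String) (in_lists : Bool) : Decidable (Pre_decode_multiple encoded code in_lists) := by
  unfold Pre_decode_multiple; infer_instance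

def pvWitness_decode_multiple : List String × List String × Bool := (["hi", "!"], ["ab", "cd"], false)

def Spec_decode_multiple (encoded : List String) (code : List String) (in_lists : Bool) (out : String) : Prop := out = decode_multiple_alt encoded code in_lists
instance (encoded : List String) (code : List String) (in_lists : Bool) (out : String) : Decidable (Spec_decode_multiple encoded code in_lists out) := by unfold Spec_decode_multiple; infer_instance

-- ===== CLAIM (what is proved, stated in full; the proofs are below) =====
def Claim_equal_decode_multiple : Prop := ∀ (encoded : List String) (code : List String) (in_lists : Bool), Dom_decode_multiple encoded code in_lists → Pre_decode_multiple encoded code in_lists → Spec_decode_multiple encoded code in_lists (decode_multiple encoded code in_lists)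

-- ===== LEMMAS AND PROOFS =====
def brender (g : Bool × List (String × String)) : String :=
  if g.1 then pydecode (PySem.Str.join "" (g.2.map Prod.fst)) (PySem.Str.join "" (g.2.map Prod.snd))
  else PySem.Str.join "" (g.2.map Prod.fst)

-- A's loop mid-run, letter run pending (word = acc.fst, code_part = acc.snd, symb = [])
-- and symbol run pending (word = code_part = [], symb = sacc), expressed through B's runs
theorem aloopA_runs (rest : List (String × String)) :
    (∀ (acc : List (String × String)) (full : List String), acc ≠ [] →
      aloopA rest full (acc.map Prod.fst) (acc.map Prod.snd) [] =
        PySem.Str.join "" (full ++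
          [pydecode (PySem.Str.join "" ((acc ++ rest.takeWhile (fun q => bkey q == true)).map Prod.fst))
                    (PySem.Str.join "" ((acc ++ rest.takeWhile (fun q => bkey q == true)).map Prod.snd))] ++
          (bruns (rest.dropWhile (fun q => bkey q == true))).map brender)) ∧
    (∀ (sacc : List String) (full : List String), sacc ≠ [] →
      aloopA rest full [] [] sacc =
        PySem.Str.join "" (full ++
          [PySem.Str.join "" (sacc ++ (rest.takeWhile (fun q => bkey q == false)).map Prod.fst)] ++
          (bruns (rest.dropWhile (fun q => bkey q == false))).map brender)) := by
  induction rest with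
  | nil =>
      constructor
      · intro acc full hacc
        simp [aloopA, bruns, hacc]
      · intro sacc full hs
        simp [aloopA, bruns, hs]
  | cons p rest ih =>
      obtain ⟨c, d⟩ := p
      constructor
      · intro acc full hacc
        cases hk : bkey (c, d) with
        | true =>
            have hc : PySem.Chars.isIn c.toList abcdStr.toList = true := by simpa [bkey] using hk
            have step : aloopA ((c, d) :: rest) full (acc.map Prod.fst) (acc.map Prod.snd) [] =
                aloopA rest full ((acc ++ [(c, d)]).map Prod.fst) ((acc ++ [(c, d)]).map Prod.snd) [] := by
              simp [aloopA, hc]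
            rw [step, (ih).1 (acc ++ [(c, d)]) full (by simp)]
            simp [hk, List.append_assoc]
        | false =>
            have hc : PySem.Chars.isIn c.toList abcdStr.toList = false := by simpa [bkey] using hk
            have step : aloopA ((c, d) :: rest) full (acc.map Prod.fst) (acc.map Prod.snd) [] =
                aloopA rest (full ++ [pydecode (PySem.Str.join "" (acc.map Prod.fst)) (PySem.Str.join "" (acc.map Prod.snd))]) [] [] [c] := by
              simp [aloopA, hc, hacc]
            rw [step, (ih).2 [c] _ (by simp)]
            simp [bruns, hk, List.append_assoc, brender]
      · intro sacc full hs
        cases hk : bkey (c, d) with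
        | false =>
            have hc : PySem.Chars.isIn c.toList abcdStr.toList = false := by simpa [bkey] using hk
            have step : aloopA ((c, d) :: rest) full [] [] sacc =
                aloopA rest full [] [] (sacc ++ [c]) := by
              simp [aloopA, hc]
            rw [step, (ih).2 (sacc ++ [c]) full (by simp)]
            simp [hk, List.append_assoc]
        | true =>
            have hc : PySem.Chars.isIn c.toList abcdStr.toList = true := by simpa [bkey] using hk
            have step : aloopA ((c, d) :: rest) full [] [] sacc =
                aloopA rest (full ++ [PySem.Str.join "" sacc]) [c] [d] [] := by
              simp [aloopA, hc, hs]
            have := (ih).1 [(c, d)] (full ++ [PySem.Str.join "" sacc]) (by simp)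
            simp only [List.map_cons, List.map_nil] at this
            rw [step, this]
            simp [bruns, hk, List.append_assoc, brender]

theorem aloopA_eq_bruns (pairs : List (String × String)) (full : List String) :
    aloopA pairs full [] [] [] = PySem.Str.join "" (full ++ (bruns pairs).map brender) := by
  cases pairs with
  | nil => simp [aloopA, bruns]
  | cons p rest =>
      obtain ⟨c, d⟩ := p
      cases hk : bkey (c, d) with
      | true =>
          have hc : PySem.Chars.isIn c.toList abcdStr.toList = true := by simpa [bkey] using hk
          have step : aloopA ((c, d) :: rest) full [] [] [] = aloopA rest full [c] [d] [] := by
            simp [aloopA, hc]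
          have := (aloopA_runs rest).1 [(c, d)] full (by simp)
          simp only [List.map_cons, List.map_nil] at this
          rw [step, this]
          simp [bruns, hk, brender]
      | false =>
          have hc : PySem.Chars.isIn c.toList abcdStr.toList = false := by simpa [bkey] using hk
          have step : aloopA ((c, d) :: rest) full [] [] [] = aloopA rest full [] [] [c] := by
            simp [aloopA, hc]
          rw [step, (aloopA_runs rest).2 [c] full (by simp)]
          simp [bruns, hk, brender]

-- ===== VERDICT (by name: the statement is the Claim_ definition above) =====
theorem decode_multiple_spec : Claim_equal_decode_multiple := by
  intro encoded code in_lists _ _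
  unfold Spec_decode_multiple decode_multiple decode_multiple_alt
  cases h : (encoded.length == 1)
  · cases in_lists
    · simp
    · simpa using aloopA_eq_bruns (encoded.zip code) []
  · simp
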